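-- pv_equiv track=rewrite | github.com/fakesociety/RentGuard-360 | backend/lambdas/privacy-shield.py | _format_clause_number
-- ===== SOURCE A (Python) =====
-- def _format_clause_number(raw_number: str) -> str:
--     """Normalizes a clause number token to a canonical form like '6.' or '6.1.'."""
--     number = raw_number.strip().strip('.')
--     if not number:
--         return raw_number.strip()
--
--     parts = [part for part in number.split('.') if part]
--     if not parts:
--         return raw_number.strip()
--
--     return f"{'.'.join(parts)}."
-- ===== SOURCE B (Python) =====
-- def _format_clause_number(raw_number: str) -> str:
--     """Normalizes a clause number token to a canonical form like '6.' or '6.1.'."""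
--     stripped = raw_number.strip()
--     core = stripped.strip('.')
--     if not core:
--         return stripped
--     out = []
--     prev_dot = False
--     for ch in core:
--         if not (prev_dot and ch == '.'):
--             out.append(ch)
--         prev_dot = ch == '.'
--     return ''.join(out) + '.'
-- ===== Notes on version B (the rewrite author's own statement) =====
-- stated objective: alternative
-- what changed: Replaces A's split/filter-empty/join pipeline over dot-separated parts with a single left-to-right character scan that copies each character unless it is a dot immediately preceded by another dot, so no intermediate part lists are built.
import Mathlib
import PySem

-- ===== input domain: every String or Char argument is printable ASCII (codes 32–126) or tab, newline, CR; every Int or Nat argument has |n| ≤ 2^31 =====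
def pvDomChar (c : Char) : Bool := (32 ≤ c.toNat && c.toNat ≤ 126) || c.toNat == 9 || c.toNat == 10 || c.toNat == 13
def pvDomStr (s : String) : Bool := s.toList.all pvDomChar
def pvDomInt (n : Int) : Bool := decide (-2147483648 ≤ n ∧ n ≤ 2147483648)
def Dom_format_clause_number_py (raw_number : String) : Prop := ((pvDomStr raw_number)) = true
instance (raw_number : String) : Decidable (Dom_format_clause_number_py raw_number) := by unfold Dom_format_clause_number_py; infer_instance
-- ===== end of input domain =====

-- B replaces A's split('.')/filter/join('.') pipeline by a single left-to-right scan with a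
-- previous-char-was-a-dot flag (objective: alternative; same cost, no intermediate part lists).

-- ===== PORT A =====
def format_clause_number_py (raw_number : String) : String :=
  let stripped := PySem.Chars.strip raw_number.toList
  let number := PySem.Chars.stripChars stripped ['.']
  if number = [] then String.ofList stripped
  else
    let parts := (PySem.Chars.splitOn number ['.']).filter (fun p => !p.isEmpty)
    if parts = [] then String.ofList stripped
    else String.ofList (PySem.Chars.join ['.'] parts ++ ['.'])

-- ===== PORT B =====
def format_clause_number_py_alt (raw_number : String) : String :=
  let stripped := PySem.Chars.strip raw_number.toList
  let core := PySem.Chars.stripChars stripped ['.']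
  if core = [] then String.ofList stripped
  else
    let out := core.foldl
      (fun (s : List Char × Bool) ch =>
        (if s.2 && (ch == '.') then s.1 else s.1 ++ [ch], ch == '.'))
      ([], false)
    String.ofList (out.1 ++ ['.'])

-- ===== PRECONDITION & SPEC =====
def Spec_format_clause_number_py (raw_number : String) (out : String) : Prop := out = format_clause_number_py_alt raw_number
instance (raw_number : String) (out : String) : Decidable (Spec_format_clause_number_py raw_number out) := by unfold Spec_format_clause_number_py; infer_instance

-- ===== CLAIM (what is proved, stated in full; the proofs are below) =====
def Claim_equal_format_clause_number_py : Prop := ∀ (raw_number : String), Dom_format_clause_number_py raw_number → Spec_format_clause_number_py raw_number (format_clause_number_py raw_number)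

-- ===== LEMMAS AND PROOFS =====

-- recursive characterization of PySem.Chars.splitOn on the single-char separator '.'
def pvSplitAux : List Char → List Char → List (List Char)
  | pre, [] => [pre]
  | pre, c :: r => if c == '.' then pre :: pvSplitAux [] r else pvSplitAux (pre ++ [c]) r

-- what B's scan computes: pvG b cs drops each '.' whose predecessor (flag b at the start) is a '.'
def pvG : Bool → List Char → List Char
  | _, [] => []
  | b, c :: r => if b && (c == '.') then pvG (c == '.') r else c :: pvG (c == '.') r

lemma pvGo_eq : ∀ (fuel : Nat) (l cur acc : _), l.length < fuel →
    PySem.Chars.splitOn.go ['.'] fuel l cur acc = acc.reverse ++ pvSplitAux cur.reverse l := by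
  intro fuel
  induction fuel with
  | zero => intro l cur acc h; omega
  | succ f ih =>
    intro l cur acc h
    cases l with
    | nil => simp [PySem.Chars.splitOn.go, pvSplitAux]
    | cons c rest =>
      by_cases hc : c = '.'
      · subst hc
        simp only [PySem.Chars.splitOn.go, List.isPrefixOf, BEq.rfl, Bool.true_and,
          if_pos, List.length_singleton, List.drop_succ_cons, List.drop_zero]
        rw [ih rest [] (cur.reverse :: acc) (by simp at h ⊢; omega)]
        simp [pvSplitAux]
      · simp only [PySem.Chars.splitOn.go, List.isPrefixOf]
        rw [if_neg (by simp; exact fun hh => hc hh.symm)]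
        rw [ih rest (c :: cur) acc (by simp at h ⊢; omega)]
        simp [pvSplitAux, hc]

lemma pvSplitOn_eq (cs : List Char) : PySem.Chars.splitOn cs ['.'] = pvSplitAux [] cs := by
  simpa using pvGo_eq (cs.length + 1) cs [] [] (by omega)

lemma pvJoin_cons (a : List Char) (l : List (List Char)) :
    PySem.Chars.join ['.'] (a :: l) = a ++ (if l = [] then [] else '.' :: PySem.Chars.join ['.'] l) := by
  cases l with
  | nil => simp [PySem.Chars.join, List.intercalate]
  | cons b m => simp [PySem.Chars.join, List.intercalate, List.intersperse]

lemma pvG_ne_nil : ∀ r : List Char, r ≠ [] → r.getLast? ≠ some '.' → pvG true r ≠ [] := by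
  intro r
  induction r with
  | nil => intro h; exact absurd rfl h
  | cons c rest ih =>
    intro _ hlast
    by_cases hc : c = '.'
    · subst hc
      cases rest with
      | nil => simp at hlast
      | cons d m =>
        rw [List.getLast?_cons_cons] at hlast
        simpa [pvG] using ih (by simp) hlast
    · simp [pvG, hc]

lemma pvJoin_filter_splitAux : ∀ (r : List Char), r.getLast? ≠ some '.' → ∀ pre : List Char,
    PySem.Chars.join ['.'] ((pvSplitAux pre r).filter (fun p => !p.isEmpty))
      = pre ++ (if pre = [] then pvG true r else pvG false r) := by
  intro r
  induction r with
  | nil =>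
    intro _ pre
    by_cases hp : pre = [] <;>
      simp [pvSplitAux, pvG, hp, PySem.Chars.join, List.intercalate]
  | cons c rest ih =>
    intro hlast pre
    have hlast' : rest.getLast? ≠ some '.' := by
      cases rest with
      | nil => simp
      | cons d m => rwa [List.getLast?_cons_cons] at hlast
    by_cases hc : c = '.'
    · subst hc
      have hrest_ne : rest ≠ [] := by rintro rfl; simp at hlast
      have hIH := ih hlast' []
      rw [if_pos rfl, List.nil_append] at hIH
      have hsplit : pvSplitAux pre ('.' :: rest) = pre :: pvSplitAux [] rest := by
        simp [pvSplitAux]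
      by_cases hp : pre = []
      · subst hp
        rw [hsplit, if_pos rfl]
        have : List.filter (fun p => !p.isEmpty) ([] :: pvSplitAux [] rest)
            = List.filter (fun p => !p.isEmpty) (pvSplitAux [] rest) := by simp
        rw [this, hIH, List.nil_append]
        simp [pvG]
      · have hne : (pvSplitAux [] rest).filter (fun p => !p.isEmpty) ≠ [] := by
          intro h0
          have : pvG true rest = [] := by
            rw [← hIH, h0]; simp [PySem.Chars.join, List.intercalate]
          exact pvG_ne_nil rest hrest_ne hlast' this
        rw [hsplit, List.filter_cons, if_pos (by simpa using hp), pvJoin_cons,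
          if_neg hne, hIH, if_neg hp]
        simp [pvG]
    · have hIH := ih hlast' (pre ++ [c])
      rw [if_neg (by simp)] at hIH
      have hsplit : pvSplitAux pre (c :: rest) = pvSplitAux (pre ++ [c]) rest := by
        simp [pvSplitAux, hc]
      rw [hsplit, hIH]
      have hcb : (c == '.') = false := by simp [hc]
      by_cases hp : pre = [] <;> simp [hp, pvG, hcb]

lemma pvFold_eq : ∀ (cs acc : List Char) (b : Bool),
    (cs.foldl (fun (s : List Char × Bool) ch =>
        (if s.2 && (ch == '.') then s.1 else s.1 ++ [ch], ch == '.')) (acc, b)).1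
      = acc ++ pvG b cs := by
  intro cs
  induction cs with
  | nil => intro acc b; simp [pvG]
  | cons c rest ih =>
    intro acc b
    simp only [List.foldl_cons]
    by_cases hb : (b && (c == '.')) = true
    · rw [if_pos hb, ih]
      simp only [Bool.and_eq_true] at hb
      simp [pvG, hb.1, hb.2]
    · rw [if_neg hb, ih]
      simp [pvG, hb]

lemma pvStrip_last (s : List Char) (c : Char) :
    (PySem.Chars.stripChars s ['.']).getLast? = some c → c ≠ '.' := by
  intro h
  unfold PySem.Chars.stripChars at h
  rw [List.getLast?_reverse] at h
  have := List.head?_dropWhile_not (fun d => List.contains ['.'] d) (List.dropWhile (fun d => List.contains ['.'] d) s).reverse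
  rw [h] at this
  simpa using this

lemma pvStrip_head (s : List Char) (c : Char) :
    (PySem.Chars.stripChars s ['.']).head? = some c → c ≠ '.' := by
  intro h
  unfold PySem.Chars.stripChars at h
  rw [List.head?_reverse] at h
  -- dropWhile is a suffix, so its last element is the last of the whole reversed list
  set p : Char → Bool := fun d => List.contains ['.'] d with hp
  set X : List Char := (List.dropWhile p s).reverse with hX
  obtain ⟨t, ht⟩ := List.dropWhile_suffix (l := X) p
  have hne : List.dropWhile p X ≠ [] := by intro h0; rw [h0] at h; simp at h
  have hXlast : X.getLast? = some c := by
    rw [← ht, List.getLast?_append_of_ne_nil _ hne, h]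
  rw [hX, List.getLast?_reverse] at hXlast
  have := List.head?_dropWhile_not p s
  rw [hXlast] at this
  simpa [hp] using this

-- ===== VERDICT (by name: the statement is the Claim_ definition above) =====
theorem format_clause_number_py_spec : Claim_equal_format_clause_number_py := by
  intro raw _
  unfold Spec_format_clause_number_py
  simp only [format_clause_number_py, format_clause_number_py_alt]
  generalize PySem.Chars.strip raw.toList = s
  generalize hcoredef : PySem.Chars.stripChars s ['.'] = core
  by_cases hc : core = []
  · rw [if_pos hc, if_pos hc]
  · rw [if_neg hc, if_neg hc]
    obtain ⟨cl, hcl⟩ := Option.ne_none_iff_exists'.mp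
      (fun h0 => hc (List.getLast?_eq_none_iff.mp h0))
    have hlast : core.getLast? ≠ some '.' := by
      rw [hcl]; intro h
      exact pvStrip_last s cl (by rw [hcoredef]; exact hcl) (by injection h)
    have hA := pvJoin_filter_splitAux core hlast []
    rw [if_pos rfl, List.nil_append] at hA
    rw [pvSplitOn_eq]
    obtain ⟨ch, rest, hcons⟩ := List.exists_cons_of_ne_nil hc
    have hhead : ch ≠ '.' := by
      apply pvStrip_head s
      rw [hcoredef, hcons]; rfl
    have hgtf : pvG true core = pvG false core := by
      rw [hcons]; simp [pvG, hhead]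
    have hparts : (pvSplitAux [] core).filter (fun p => !p.isEmpty) ≠ [] := by
      intro h0
      have : pvG true core = [] := by
        rw [← hA, h0]; simp [PySem.Chars.join, List.intercalate]
      exact pvG_ne_nil core hc hlast this
    rw [if_neg hparts, hA, hgtf, pvFold_eq core [] false]
    simp
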